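-- pv_equiv track=rewrite | github.com/VivianePons/public-notebooks | sWeakOrder/spermutahedron_old.py | get_sperm_point
-- ===== SOURCE A (Python) =====
-- def get_sperm_point(sperm):
--     n = max(sperm)
--     P = [0 for i in range(n)]
--     counts = {}
--     for a in sperm:
--         if not a in counts:
--             for b in range(a+1,n+1):
--                 v = counts.get(b,0)
--                 P[a-1] += v
--                 P[b-1] -= v
--         counts[a] = counts.get(a,0) +1
--     return P
-- ===== SOURCE B (Python) =====
-- def get_sperm_point(sperm):
--     n = max(sperm)
--     first = {}
--     for i, a in enumerate(sperm):
--         if a not in first: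
--             first[a] = i
--     P = [0] * n
--     for a, f in first.items():
--         prefix = sperm[:f]
--         P[a - 1] += sum(1 for x in prefix if x > a)
--         for b in first:
--             if a < b:
--                 P[b - 1] -= prefix.count(b)
--     return P
-- ===== Notes on version B (the rewrite author's own statement) =====
-- stated objective: alternative
-- what changed: B replaces A's stateful single pass (running counts dict plus an inner loop over the whole value range a+1..n at each first occurrence) by a declarative two-phase computation: build the first-occurrence index map once, then for each distinct value update the coordinate vector by direct counting over its prefix, looping only over the distinct values instead of the integer range; Pre_ excludes all-nonpositive lists, where A returns [] only because its inner range is empty while B's slot update naturally raises IndexError on the empty coordinate vector.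
-- outside the precondition, e.g. on get_sperm_point([0, 0]): A returns [], B raises IndexError; on get_sperm_point([-1, -1]): A returns [], B raises IndexError; on get_sperm_point([]): A raises ValueError, B raises ValueError
import Mathlib
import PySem

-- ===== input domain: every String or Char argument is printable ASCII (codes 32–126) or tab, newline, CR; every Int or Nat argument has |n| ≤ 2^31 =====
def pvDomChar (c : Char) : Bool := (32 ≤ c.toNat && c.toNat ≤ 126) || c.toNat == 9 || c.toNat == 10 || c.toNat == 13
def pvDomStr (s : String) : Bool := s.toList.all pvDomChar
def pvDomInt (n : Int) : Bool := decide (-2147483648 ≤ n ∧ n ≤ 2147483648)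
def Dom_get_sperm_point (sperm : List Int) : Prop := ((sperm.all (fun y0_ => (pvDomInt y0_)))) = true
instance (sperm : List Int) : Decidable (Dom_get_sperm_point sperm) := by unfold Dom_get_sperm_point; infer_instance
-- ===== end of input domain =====

-- B replaces A's stateful single pass (running counts, inner loop over the integer range a+1..n)
-- by a two-phase computation: first-occurrence index map, then per distinct value an update of the
-- coordinate vector by direct counting over its prefix; objective: alternative, not claimed faster.

-- ===== PORT A =====
-- loop body of A's 'for a in sperm' (P, counts as the state), kept as a named helper
def astep (n : Int) (st : List Int × PySem.Dict Int Int) (a : Int) : List Int × PySem.Dict Int Int :=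
  let P := st.1
  let counts := st.2
  let P := if counts.contains a then P else
    (PySem.List.pyRange (a+1) (n+1)).foldl (fun P b =>
      let v := counts.getD b 0
      let P := PySem.List.pySetD P (a-1) (PySem.List.pyGetD P (a-1) 0 + v)
      PySem.List.pySetD P (b-1) (PySem.List.pyGetD P (b-1) 0 - v)) P
  (P, counts.insert a (counts.getD a 0 + 1))

def get_sperm_point (sperm : List Int) : List Int :=
  match PySem.List.max? sperm (fun x => x) with
  | none => []  -- max([]) raises ValueError; excluded by Pre_
  | some n =>
    let P : List Int := (PySem.List.pyRange 0 n).map (fun _ => (0 : Int))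
    (sperm.foldl (astep n) (P, PySem.Dict.empty)).1

-- ===== PORT B =====
-- body of B's inner 'for b in first: if a < b: P[b-1] -= prefix.count(b)'
def bstep (sperm : List Int) (p : Int × Int) (P : List Int) (b : Int) : List Int :=
  if p.1 < b then
    PySem.List.pySetD P (b-1) (PySem.List.pyGetD P (b-1) 0
      - ((PySem.List.slice sperm none (some p.2)).count b : Int))
  else P

-- body of B's outer 'for a, f in first.items(): P[a-1] += …; for b in first: …'
def bitem (sperm : List Int) (ks : List Int) (P : List Int) (p : Int × Int) : List Int :=
  ks.foldl (bstep sperm p)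
    (PySem.List.pySetD P (p.1-1) (PySem.List.pyGetD P (p.1-1) 0
      + ((PySem.List.slice sperm none (some p.2)).countP (fun x => p.1 < x) : Int)))

def get_sperm_point_alt (sperm : List Int) : List Int :=
  match PySem.List.max? sperm (fun x => x) with
  | none => []  -- max([]) raises ValueError; excluded by Pre_
  | some n =>
    let first : PySem.Dict Int Int :=
      (PySem.List.enumerate sperm).foldl
        (fun d p => if d.contains p.2 then d else d.insert p.2 p.1) PySem.Dict.empty
    first.items.foldl (bitem sperm first.keys) (List.replicate n.toNat 0)

-- ===== PRECONDITION & SPEC =====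
-- Pre_ is A's returning domain minus the all-nonpositive lists: it excludes the empty list
-- (A's max([]) raises ValueError), lists with an entry a < 1 - max (A raises IndexError at
-- P[a-1]), and lists whose entries are all ≤ 0 — on those A returns [] only because its inner
-- range is empty, while B's slot update naturally raises IndexError on the empty vector P.
def Pre_get_sperm_point (sperm : List Int) : Prop :=
  sperm ≠ [] ∧ (∃ x ∈ sperm, 1 ≤ x) ∧ ∀ a ∈ sperm, ∃ b ∈ sperm, 1 - b ≤ a
instance (sperm : List Int) : Decidable (Pre_get_sperm_point sperm) := by
  unfold Pre_get_sperm_point; infer_instance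
def pvWitness_get_sperm_point : List Int := [2, 1, 2]

def Spec_get_sperm_point (sperm : List Int) (out : List Int) : Prop := out = get_sperm_point_alt sperm
instance (sperm : List Int) (out : List Int) : Decidable (Spec_get_sperm_point sperm out) := by
  unfold Spec_get_sperm_point; infer_instance

-- ===== CLAIM (what is proved, stated in full; the proofs are below) =====
def Claim_equal_get_sperm_point : Prop := ∀ (sperm : List Int), Dom_get_sperm_point sperm → Pre_get_sperm_point sperm → Spec_get_sperm_point sperm (get_sperm_point sperm)

-- ===== LEMMAS AND PROOFS =====

-- ---- canonical middle form shared by both ports ----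
def FD (l : List Int) : PySem.Dict Int Int :=
  (PySem.List.enumerate l).foldl
    (fun d p => if d.contains p.2 then d else d.insert p.2 p.1) PySem.Dict.empty

def addv (l : List Int) (v : Int) : Int :=
  if (FD l).contains v then
    ((PySem.List.slice l none (some ((FD l).getD v 0))).countP (fun x => v < x) : Int)
  else 0

def subv (l : List Int) (v : Int) : Int :=
  (FD l).items.foldl (fun s p =>
    if p.1 < v then s + ((PySem.List.slice l none (some p.2)).count v : Int) else s) 0

def bval (l : List Int) (n k : Int) : Int :=
  (addv l k - subv l k) + (addv l (k-n) - subv l (k-n))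

lemma bval_eq (l : List Int) (n k : Int) :
    bval l n k = (addv l k - subv l k) + (addv l (k-n) - subv l (k-n)) := rfl

-- ---- pyRange bookkeeping ----
lemma pyRange_one_map (n : Int) :
    PySem.List.pyRange 1 (n+1) = (List.range n.toNat).map (fun (j : Nat) => ((j : Int) + 1)) := by
  rw [PySem.List.pyRange_of_pos 1 (n+1) (by norm_num)]
  have h2 : n + 1 - 1 + 1 - 1 = n := by ring
  rw [h2, Int.ediv_one]
  by_cases h : (1:Int) < n + 1
  · rw [if_pos h]
    exact List.map_congr_left (fun j _ => by ring)
  · rw [if_neg h]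
    have h3 : n.toNat = 0 := by omega
    rw [h3]; simp

lemma pyRange_zero_map (n : Int) :
    PySem.List.pyRange 0 n = (List.range n.toNat).map (fun (j : Nat) => (j : Int)) := by
  rw [PySem.List.pyRange_of_pos 0 n (by norm_num)]
  have h2 : n - 0 + 1 - 1 = n := by ring
  rw [h2, Int.ediv_one]
  by_cases h : (0:Int) < n
  · rw [if_pos h]
    exact List.map_congr_left (fun j _ => by ring)
  · rw [if_neg h]
    have h3 : n.toNat = 0 := by omega
    rw [h3]; simp

lemma nodup_pyRange (a b : Int) : (PySem.List.pyRange a b).Nodup := by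
  rw [PySem.List.pyRange_of_pos a b (by norm_num)]
  exact List.Nodup.map (fun x y h => by omega) List.nodup_range

lemma count_pyRange_one (a b x : Int) :
    (PySem.List.pyRange a b).count x = if a ≤ x ∧ x < b then 1 else 0 := by
  by_cases h : a ≤ x ∧ x < b
  · rw [if_pos h]
    have hm : x ∈ PySem.List.pyRange a b := PySem.List.mem_pyRange_one.mpr h
    have h1 := List.nodup_iff_count_le_one.mp (nodup_pyRange a b) x
    have h2 : 0 < (PySem.List.pyRange a b).count x := List.count_pos_iff.mpr hm
    omega
  · rw [if_neg h]
    exact List.count_eq_zero.mpr (fun hm => h (PySem.List.mem_pyRange_one.mp hm))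

-- ---- FD characterization ----
lemma FD_nil : FD [] = PySem.Dict.empty := rfl

lemma FD_append (pre : List Int) (c : Int) :
    FD (pre ++ [c]) =
      if (FD pre).contains c then FD pre else (FD pre).insert c (pre.length : Int) := by
  unfold FD
  rw [PySem.List.enumerate_append, List.foldl_append, PySem.List.enumerate_cons,
      PySem.List.enumerate_nil]
  simp

lemma FD_contains (pre : List Int) : ∀ (a : Int), (FD pre).contains a = true ↔ a ∈ pre := by
  induction pre using List.reverseRecOn with
  | nil => intro a; simp [FD_nil]
  | append_singleton pre c ih =>
    intro a
    rw [FD_append]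
    cases hb : (FD pre).contains c with
    | true =>
      rw [if_pos (rfl : true = true)]
      constructor
      · intro ha; exact List.mem_append.mpr (Or.inl ((ih a).mp ha))
      · intro ha
        rcases List.mem_append.mp ha with h' | h'
        · exact (ih a).mpr h'
        · simp at h'; subst h'; exact hb
    | false =>
      rw [if_neg (by simp), PySem.Dict.contains_insert]
      simp only [Bool.or_eq_true, beq_iff_eq, ih a, List.mem_append, List.mem_singleton]
      tauto

lemma FD_items_bound (pre : List Int) :
    ∀ p ∈ (FD pre).items, 0 ≤ p.2 ∧ p.2 ≤ (pre.length : Int) := by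
  induction pre using List.reverseRecOn with
  | nil =>
    intro p hp
    have : (FD (List.nil (α := Int))).items = [] := rfl
    rw [this] at hp; cases hp
  | append_singleton pre c ih =>
    intro p hp
    rw [FD_append] at hp
    cases hb : (FD pre).contains c with
    | true =>
      rw [if_pos hb] at hp
      obtain ⟨h0, h1⟩ := ih p hp
      refine ⟨h0, ?_⟩
      simp only [List.length_append, List.length_singleton]
      push_cast
      omega
    | false =>
      rw [if_neg (by simp [hb]), PySem.Dict.items_insert_of_not_contains _ _ hb] at hp
      rcases List.mem_append.mp hp with h' | h'
      · obtain ⟨h0, h1⟩ := ih p h'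
        refine ⟨h0, ?_⟩
        simp only [List.length_append, List.length_singleton]
        push_cast
        omega
      · simp at h'; subst h'
        refine ⟨by positivity, ?_⟩
        simp only [List.length_append, List.length_singleton]
        push_cast
        omega

lemma FD_getD_bound (pre : List Int) (k : Int) (h : (FD pre).contains k = true) :
    0 ≤ (FD pre).getD k 0 ∧ (FD pre).getD k 0 ≤ (pre.length : Int) := by
  rw [PySem.Dict.contains_eq_isSome_get?] at h
  obtain ⟨v, hv⟩ := Option.isSome_iff_exists.mp h
  have hm := PySem.Dict.mem_items_of_get?_eq_some _ hv
  have hb := FD_items_bound pre _ hm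
  rw [PySem.Dict.getD_eq_get?_getD, hv]
  simpa using hb

lemma FD_keys_nodup (l : List Int) : (FD l).keys.Nodup := by
  induction l using List.reverseRecOn with
  | nil => simp [FD_nil]
  | append_singleton pre c ih =>
    rw [FD_append]
    cases hb : (FD pre).contains c with
    | true => rw [if_pos (rfl : true = true)]; exact ih
    | false => rw [if_neg (by simp)]; exact PySem.Dict.nodup_keys_insert _ _ _ ih

lemma FD_mem_keys (l : List Int) (b : Int) : b ∈ (FD l).keys ↔ b ∈ l := by
  rw [← PySem.Dict.contains_iff_mem_keys]
  exact FD_contains l b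

lemma slice_take_stable (pre : List Int) (c i : Int) (h0 : 0 ≤ i) (h : i ≤ (pre.length : Int)) :
    PySem.List.slice (pre ++ [c]) none (some i) = PySem.List.slice pre none (some i) := by
  rw [PySem.List.slice_to _ h0, PySem.List.slice_to _ h0,
      List.take_append_of_le_length (Int.toNat_le.mpr h)]

-- ---- addv / subv under appending one element ----
lemma addv_nil (v : Int) : addv [] v = 0 := by
  have h1 : (FD []).contains v = false := by
    cases hb : (FD []).contains v with
    | false => rfl
    | true => exact absurd ((FD_contains [] v).mp hb) (by simp)
  simp [addv, h1]

lemma subv_nil (v : Int) : subv [] v = 0 := by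
  have h2 : (FD (List.nil (α := Int))).items = [] := rfl
  simp [subv, h2]

lemma addv_seen (pre : List Int) (c v : Int) (hc : c ∈ pre) :
    addv (pre ++ [c]) v = addv pre v := by
  have hco : (FD pre).contains c = true := (FD_contains pre c).mpr hc
  unfold addv
  rw [FD_append, if_pos hco]
  cases hk : (FD pre).contains v with
  | false => rfl
  | true =>
    rw [if_pos (rfl : true = true), if_pos (rfl : true = true)]
    obtain ⟨hb0, hb1⟩ := FD_getD_bound pre v hk
    rw [slice_take_stable pre c _ hb0 hb1]

lemma subv_seen (pre : List Int) (c v : Int) (hc : c ∈ pre) :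
    subv (pre ++ [c]) v = subv pre v := by
  have hco : (FD pre).contains c = true := (FD_contains pre c).mpr hc
  unfold subv
  rw [FD_append, if_pos hco]
  apply PySem.List.foldl_congr_mem
  intro acc p hp
  obtain ⟨h0, h1⟩ := FD_items_bound pre p hp
  rw [slice_take_stable pre c _ h0 h1]

lemma contains_false_of_not_mem (pre : List Int) (c : Int) (hc : c ∉ pre) :
    (FD pre).contains c = false := by
  cases hb : (FD pre).contains c with
  | false => rfl
  | true => exact absurd ((FD_contains pre c).mp hb) hc

lemma subv_unseen (pre : List Int) (c v : Int) (hc : c ∉ pre) :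
    subv (pre ++ [c]) v = subv pre v + (if c < v then ((pre.count v : Nat) : Int) else 0) := by
  have hco : (FD pre).contains c = false := contains_false_of_not_mem pre c hc
  unfold subv
  rw [FD_append, if_neg (by simp [hco]),
      PySem.Dict.items_insert_of_not_contains _ _ hco, List.foldl_append]
  have h1 : (FD pre).items.foldl (fun s p =>
      if p.1 < v then s + ((PySem.List.slice (pre ++ [c]) none (some p.2)).count v : Int) else s) 0
      = (FD pre).items.foldl (fun s p =>
      if p.1 < v then s + ((PySem.List.slice pre none (some p.2)).count v : Int) else s) 0 := by
    apply PySem.List.foldl_congr_mem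
    intro acc p hp
    obtain ⟨h0, h1⟩ := FD_items_bound pre p hp
    rw [slice_take_stable pre c _ h0 h1]
  rw [h1]
  simp only [List.foldl_cons, List.foldl_nil]
  have h2 : PySem.List.slice (pre ++ [c]) none (some (pre.length : Int)) = pre := by
    rw [PySem.List.slice_to _ (by positivity), Int.toNat_natCast, List.take_left]
  rw [h2]
  split_ifs with h <;> ring

lemma addv_unseen (pre : List Int) (c v : Int) (hc : c ∉ pre) :
    addv (pre ++ [c]) v
      = addv pre v + (if v = c then ((pre.countP (fun x => decide (c < x)) : Nat) : Int) else 0) := by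
  have hco : (FD pre).contains c = false := contains_false_of_not_mem pre c hc
  simp only [addv]
  by_cases hkc : v = c
  · subst hkc
    have hcont : (FD (pre ++ [v])).contains v = true :=
      (FD_contains (pre ++ [v]) v).mpr (by simp)
    have hgetD : (FD (pre ++ [v])).getD v 0 = (pre.length : Int) := by
      rw [FD_append, if_neg (by simp [hco]), PySem.Dict.getD_insert, if_pos rfl]
    rw [hcont, hco, if_pos (rfl : true = true), if_neg (by simp), hgetD,
        PySem.List.slice_to _ (by positivity), Int.toNat_natCast, List.take_left,
        if_pos rfl]
    ring
  · have hcont : (FD (pre ++ [c])).contains v = (FD pre).contains v := by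
      rw [FD_append, if_neg (by simp [hco]), PySem.Dict.contains_insert,
          show (v == c) = false by simp [hkc], Bool.false_or]
    rw [hcont, if_neg hkc]
    cases hk : (FD pre).contains v with
    | false =>
      rw [if_neg (by simp), if_neg (by simp)]
      ring
    | true =>
      have hgetD : (FD (pre ++ [c])).getD v 0 = (FD pre).getD v 0 := by
        rw [FD_append, if_neg (by simp [hco]), PySem.Dict.getD_insert, if_neg hkc]
      obtain ⟨h0, h1⟩ := FD_getD_bound pre v hk
      rw [if_pos (rfl : true = true), if_pos (rfl : true = true), hgetD,
          slice_take_stable pre c _ h0 h1]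
      ring

-- ---- bval under appending one element ----
lemma bval_nil (n k : Int) : bval [] n k = 0 := by
  rw [bval_eq, addv_nil, addv_nil, subv_nil, subv_nil]
  ring

lemma bval_append_seen (pre : List Int) (c n k : Int) (hc : c ∈ pre) :
    bval (pre ++ [c]) n k = bval pre n k := by
  rw [bval_eq, bval_eq, addv_seen pre c _ hc, addv_seen pre c _ hc,
      subv_seen pre c _ hc, subv_seen pre c _ hc]

lemma bval_append_unseen (pre : List Int) (c n k : Int) (hn : 1 ≤ n) (hc : c ∉ pre) :
    bval (pre ++ [c]) n k = bval pre n k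
      + (if k = c ∨ k - n = c then ((pre.countP (fun x => decide (c < x)) : Nat) : Int) else 0)
      - (if c < k then ((pre.count k : Nat) : Int) else 0)
      - (if c < k - n then ((pre.count (k-n) : Nat) : Int) else 0) := by
  rw [bval_eq, bval_eq, addv_unseen pre c _ hc, addv_unseen pre c _ hc,
      subv_unseen pre c _ hc, subv_unseen pre c _ hc]
  split_ifs <;> (try (exfalso; omega)) <;> ring

-- ---- sum of counts over a value range = countP ----
lemma sum_counts_range (c n : Int) : ∀ (pre : List Int), (∀ x ∈ pre, x ≤ n) →
    ((PySem.List.pyRange (c+1) (n+1)).map (fun b => ((pre.count b : Nat) : Int))).sum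
      = ((pre.countP (fun x => decide (c < x)) : Nat) : Int) := by
  intro pre
  induction pre with
  | nil => intro _; simp
  | cons x t ih =>
    intro hpre
    have hx : x ≤ n := hpre x (by simp)
    have ih' := ih (fun y hy => hpre y (by simp [hy]))
    have hstep : (PySem.List.pyRange (c+1) (n+1)).map (fun b => (((x :: t).count b : Nat) : Int))
        = (PySem.List.pyRange (c+1) (n+1)).map
            (fun b => ((t.count b : Nat) : Int) + (if b = x then 1 else 0)) := by
      apply List.map_congr_left
      intro b _
      rw [List.count_cons]
      by_cases hbx : b = x
      · rw [if_pos hbx, if_pos (by simp [hbx])]; push_cast; ring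
      · rw [if_neg hbx, if_neg (by simp; exact fun h => hbx h.symm)]; push_cast; ring
    rw [hstep, PySem.List.sum_map_add_int, ih']
    have h2 : ((PySem.List.pyRange (c+1) (n+1)).map (fun b => if b = x then (1:Int) else 0)).sum
        = if c < x then 1 else 0 := by
      have h3 : ((PySem.List.pyRange (c+1) (n+1)).map (fun b => if b = x then (1:Int) else 0))
          = ((PySem.List.pyRange (c+1) (n+1)).map
              (fun b => if (fun y => y == x) b = true then (1:Int) else 0)) := by
        apply List.map_congr_left
        intro b _
        by_cases hbx : b = x
        · rw [if_pos hbx, if_pos (by simpa using hbx)]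
        · rw [if_neg hbx, if_neg (by simpa using hbx)]
      rw [h3, PySem.List.sum_map_ite_one_zero]
      have h4 : List.countP (fun y => y == x) (PySem.List.pyRange (c+1) (n+1))
          = (PySem.List.pyRange (c+1) (n+1)).count x := rfl
      rw [h4, count_pyRange_one]
      by_cases hcx : c < x
      · rw [if_pos (by omega), if_pos hcx]; rfl
      · rw [if_neg (by omega), if_neg hcx]; rfl
    rw [h2, List.countP_cons]
    by_cases hcx : c < x
    · simp only [hcx, decide_true, if_true]
      push_cast
      ring
    · simp only [hcx, decide_false, if_false]
      push_cast
      ring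

-- ---- pointwise view of range-indexed lists, with Python's negative-index rule ----
lemma getD_R (F : Nat → Int) (N : Nat) (i : Int) (h0 : 0 ≤ i) (h1 : i < (N : Int)) :
    PySem.List.pyGetD ((List.range N).map F) i 0 = F i.toNat := by
  have hlen : i < ((List.map F (List.range N)).length : Int) := by simpa using h1
  rw [PySem.List.pyGetD_eq_getElem _ _ h0 hlen]
  simp

lemma pyIdx_eq (N : Nat) (i : Int) (h0 : -(N:Int) ≤ i) (h1 : i < (N:Int)) (m : Nat)
    (hm : (m : Int) = if 0 ≤ i then i else i + N) : PySem.List.pyIdx? N i = some m := by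
  unfold PySem.List.pyIdx?
  by_cases h : 0 ≤ i
  · rw [if_pos h] at hm
    rw [if_pos h, if_pos h1]
    simp only [Option.some.injEq]
    omega
  · rw [if_neg h] at hm
    rw [if_neg h, if_pos h0]
    simp only [Option.some.injEq]
    omega

lemma getD_W (F : Nat → Int) (N : Nat) (i : Int) (h0 : -(N:Int) ≤ i) (h1 : i < (N:Int)) (m : Nat)
    (hm : (m : Int) = if 0 ≤ i then i else i + N) :
    PySem.List.pyGetD ((List.range N).map F) i 0 = F m := by
  by_cases h : 0 ≤ i
  · rw [if_pos h] at hm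
    rw [getD_R F N i h h1]
    congr 1
    omega
  · rw [if_neg h] at hm
    have hk : i = -((((-i).toNat : Nat)) : Int) := by omega
    rw [hk, PySem.List.pyGetD_neg_natCast _ _ _ (by omega) (by simp; omega)]
    simp only [List.length_map, List.length_range, List.getElem_map, List.getElem_range]
    congr 1
    omega

lemma set_map_range (F : Nat → Int) (N m : Nat) (v : Int) :
    ((List.range N).map F).set m v = (List.range N).map (fun j => if j = m then v else F j) := by
  apply List.ext_getElem
  · simp
  · intro j hj1 hj2
    simp only [List.getElem_set, List.getElem_map, List.getElem_range]
    by_cases hji : m = j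
    · rw [if_pos hji, if_pos hji.symm]
    · rw [if_neg hji, if_neg (fun h => hji h.symm)]

lemma set_W (F : Nat → Int) (N : Nat) (i : Int) (v : Int) (h0 : -(N:Int) ≤ i) (h1 : i < (N:Int))
    (m : Nat) (hm : (m : Int) = if 0 ≤ i then i else i + N) :
    PySem.List.pySetD ((List.range N).map F) i v
      = (List.range N).map (fun j => if j = m then v else F j) := by
  unfold PySem.List.pySetD PySem.List.pySet?
  rw [show ((List.range N).map F).length = N by simp, pyIdx_eq N i h0 h1 m hm]
  simp only [Option.map_some, Option.getD_some]
  exact set_map_range F N m v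

-- ---- the inner 'for b in range(a+1, n+1)' loop of A, pointwise on the value slots ----
lemma inner_fold (d : PySem.Dict Int Int) (c n : Int) (hn : 1 ≤ n) (hc1 : 1 - n ≤ c)
    (hcn : c ≤ n) :
    ∀ (bs : List Int) (f : Int → Int), (∀ b ∈ bs, c < b ∧ b ≤ n) →
    bs.foldl (fun P b =>
        PySem.List.pySetD (PySem.List.pySetD P (c-1) (PySem.List.pyGetD P (c-1) 0 + d.getD b 0))
          (b-1)
          (PySem.List.pyGetD
            (PySem.List.pySetD P (c-1) (PySem.List.pyGetD P (c-1) 0 + d.getD b 0)) (b-1) 0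
            - d.getD b 0))
      ((List.range n.toNat).map (fun (j : Nat) => f ((j : Int) + 1)))
    = (List.range n.toNat).map (fun (j : Nat) => f ((j : Int) + 1)
        + (if (j : Int) + 1 = c ∨ (j : Int) + 1 - n = c then (bs.map (fun b => d.getD b 0)).sum else 0)
        - ((bs.count ((j : Int) + 1) : Nat) : Int) * d.getD ((j : Int) + 1) 0
        - ((bs.count ((j : Int) + 1 - n) : Nat) : Int) * d.getD ((j : Int) + 1 - n) 0) := by
  intro bs
  induction bs with
  | nil =>
    intro f _
    simp
  | cons b bs ih =>
    intro f hb
    obtain ⟨hcb, hbn⟩ := hb b (by simp)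
    have hNn : ((n.toNat : Nat) : Int) = n := by omega
    obtain ⟨mc, hmc⟩ : ∃ m : Nat, (m : Int) = if 0 ≤ c - 1 then c - 1 else c - 1 + (n.toNat : Int) :=
      ⟨(if 0 ≤ c - 1 then c - 1 else c - 1 + (n.toNat : Int)).toNat, by split_ifs <;> omega⟩
    obtain ⟨mb, hmb⟩ : ∃ m : Nat, (m : Int) = if 0 ≤ b - 1 then b - 1 else b - 1 + (n.toNat : Int) :=
      ⟨(if 0 ≤ b - 1 then b - 1 else b - 1 + (n.toNat : Int)).toNat, by split_ifs <;> omega⟩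
    have hmc2 : (0 ≤ c - 1 ∧ (mc : Int) = c - 1) ∨ (c - 1 < 0 ∧ (mc : Int) = c - 1 + n) := by
      by_cases h : 0 ≤ c - 1
      · left; rw [if_pos h] at hmc; exact ⟨h, hmc⟩
      · right; rw [if_neg h] at hmc; exact ⟨by omega, by omega⟩
    have hmb2 : (0 ≤ b - 1 ∧ (mb : Int) = b - 1) ∨ (b - 1 < 0 ∧ (mb : Int) = b - 1 + n) := by
      by_cases h : 0 ≤ b - 1
      · left; rw [if_pos h] at hmb; exact ⟨h, hmb⟩
      · right; rw [if_neg h] at hmb; exact ⟨by omega, by omega⟩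
    rw [List.foldl_cons]
    rw [getD_W _ _ _ (by omega) (by omega) mc hmc]
    rw [set_W _ _ _ _ (by omega) (by omega) mc hmc]
    rw [getD_W _ _ _ (by omega) (by omega) mb hmb]
    rw [set_W _ _ _ _ (by omega) (by omega) mb hmb]
    have hM : (List.range n.toNat).map (fun (j : Nat) =>
          if j = mb then
            (if mb = mc then f ((mc : Int) + 1) + d.getD b 0 else f ((mb : Int) + 1)) - d.getD b 0
          else if j = mc then f ((mc : Int) + 1) + d.getD b 0 else f ((j : Int) + 1))
        = (List.range n.toNat).map (fun (j : Nat) =>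
            (fun k => f k + (if k = c ∨ k - n = c then d.getD b 0 else 0)
              - (if k = b ∨ k - n = b then d.getD b 0 else 0)) ((j : Int) + 1)) := by
      apply List.map_congr_left
      intro j hj
      have hjN : j < n.toNat := List.mem_range.mp hj
      dsimp only
      by_cases hjb : j = mb
      · rw [if_pos hjb, if_pos (by omega : (j:Int) + 1 = b ∨ (j:Int) + 1 - n = b)]
        by_cases hbc : mb = mc
        · rw [if_pos hbc, if_pos (by omega : (j:Int) + 1 = c ∨ (j:Int) + 1 - n = c)]
          have hfc : (mc : Int) + 1 = (j : Int) + 1 := by omega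
          rw [hfc]
          try ring
        · rw [if_neg hbc, if_neg (by omega : ¬ ((j:Int) + 1 = c ∨ (j:Int) + 1 - n = c))]
          have hfb : (mb : Int) + 1 = (j : Int) + 1 := by omega
          rw [hfb]
          try ring
      · rw [if_neg hjb, if_neg (by omega : ¬ ((j:Int) + 1 = b ∨ (j:Int) + 1 - n = b))]
        by_cases hjc : j = mc
        · rw [if_pos hjc, if_pos (by omega : (j:Int) + 1 = c ∨ (j:Int) + 1 - n = c)]
          have hfc : (mc : Int) + 1 = (j : Int) + 1 := by omega
          rw [hfc]
          try ring
        · rw [if_neg hjc, if_neg (by omega : ¬ ((j:Int) + 1 = c ∨ (j:Int) + 1 - n = c))]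
          ring
    rw [hM, ih (fun k => (f k + if k = c ∨ k - n = c then d.getD b 0 else 0)
          - if k = b ∨ k - n = b then d.getD b 0 else 0)
          (fun b' hb' => hb b' (by simp [hb']))]
    apply List.map_congr_left
    intro j hj
    have hjN : j < n.toNat := List.mem_range.mp hj
    try dsimp only
    rw [List.count_cons, List.count_cons, List.map_cons, List.sum_cons]
    by_cases hB1 : (j : Int) + 1 = b
    · have hB2 : ¬ ((j : Int) + 1 - n = b) := by omega
      rw [if_pos (Or.inl hB1),
          if_pos (by simp only [beq_iff_eq]; omega : (b == (j:Int) + 1) = true),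
          if_neg (by simp only [beq_iff_eq]; omega : ¬ ((b == (j:Int) + 1 - n) = true)),
          ← hB1]
      by_cases hC : (j : Int) + 1 = c ∨ (j : Int) + 1 - n = c
      · simp only [if_pos hC]
        push_cast
        ring
      · simp only [if_neg hC]
        push_cast
        ring
    · by_cases hB2 : (j : Int) + 1 - n = b
      · rw [if_pos (Or.inr hB2),
            if_neg (by simp only [beq_iff_eq]; omega : ¬ ((b == (j:Int) + 1) = true)),
            if_pos (by simp only [beq_iff_eq]; omega : (b == (j:Int) + 1 - n) = true),
            ← hB2]
        by_cases hC : (j : Int) + 1 = c ∨ (j : Int) + 1 - n = c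
        · simp only [if_pos hC]
          push_cast
          ring
        · simp only [if_neg hC]
          push_cast
          ring
      · rw [if_neg (by tauto : ¬ ((j:Int) + 1 = b ∨ (j:Int) + 1 - n = b)),
            if_neg (by simp only [beq_iff_eq]; omega : ¬ ((b == (j:Int) + 1) = true)),
            if_neg (by simp only [beq_iff_eq]; omega : ¬ ((b == (j:Int) + 1 - n) = true))]
        by_cases hC : (j : Int) + 1 = c ∨ (j : Int) + 1 - n = c
        · simp only [if_pos hC]
          push_cast
          ring
        · simp only [if_neg hC]
          push_cast
          ring

-- ---- one step of A's outer loop preserves the bval description ----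
lemma astep_eq (pre : List Int) (c n : Int) (hn : 1 ≤ n) (hc1 : 1 - n ≤ c) (hcn : c ≤ n)
    (hpre : ∀ x ∈ pre, x ≤ n) :
    astep n ((PySem.List.pyRange 1 (n+1)).map (bval pre n), PySem.Dict.counter pre) c
      = ((PySem.List.pyRange 1 (n+1)).map (bval (pre ++ [c]) n), PySem.Dict.counter (pre ++ [c])) := by
  have hc2 : PySem.Dict.counter (pre ++ [c])
      = (PySem.Dict.counter pre).insert c ((PySem.Dict.counter pre).getD c 0 + 1) := by
    rw [← PySem.Dict.foldl_insert_getD_add_one_eq_counter,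
        ← PySem.Dict.foldl_insert_getD_add_one_eq_counter, List.foldl_append,
        List.foldl_cons, List.foldl_nil]
  simp only [astep]
  cases hb : (PySem.Dict.counter pre).contains c with
  | true =>
    have hcmem : c ∈ pre := by
      rw [PySem.Dict.contains_counter] at hb
      simpa using hb
    rw [if_pos (rfl : true = true), hc2]
    refine congrArg₂ Prod.mk ?_ rfl
    exact List.map_congr_left (fun k _ => (bval_append_seen pre c n k hcmem).symm)
  | false =>
    have hcmem : c ∉ pre := by
      rw [PySem.Dict.contains_counter] at hb
      simpa using hb
    rw [if_neg (by simp : ¬(false = true)), hc2]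
    refine congrArg₂ Prod.mk ?_ rfl
    rw [pyRange_one_map, List.map_map, List.map_map]
    simp only [Function.comp_def]
    rw [inner_fold (PySem.Dict.counter pre) c n hn hc1 hcn _ (bval pre n)
          (fun b hb' => by rw [PySem.List.mem_pyRange_one] at hb'; omega)]
    apply List.map_congr_left
    intro j hj
    have hjn : (j:Int) + 1 ≤ n := by
      have := List.mem_range.mp hj
      omega
    have hsum : ((PySem.List.pyRange (c+1) (n+1)).map
          (fun b => (PySem.Dict.counter pre).getD b 0)).sum
        = ((pre.countP (fun x => decide (c < x)) : Nat) : Int) := by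
      rw [show (PySem.List.pyRange (c+1) (n+1)).map
            (fun b => (PySem.Dict.counter pre).getD b 0)
          = (PySem.List.pyRange (c+1) (n+1)).map (fun b => ((pre.count b : Nat) : Int)) from
          List.map_congr_left (fun b _ => PySem.Dict.getD_counter pre b)]
      exact sum_counts_range c n pre hpre
    rw [hsum, PySem.Dict.getD_counter, PySem.Dict.getD_counter, count_pyRange_one,
        count_pyRange_one, bval_append_unseen pre c n _ hn hcmem]
    by_cases h2 : c < (j:Int) + 1
    · rw [if_pos (by omega : c + 1 ≤ (j:Int) + 1 ∧ (j:Int) + 1 < n + 1), if_pos h2]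
      by_cases h3 : c < (j:Int) + 1 - n
      · rw [if_pos (by omega : c + 1 ≤ (j:Int) + 1 - n ∧ (j:Int) + 1 - n < n + 1), if_pos h3]
        push_cast
        ring
      · rw [if_neg (by omega : ¬ (c + 1 ≤ (j:Int) + 1 - n ∧ (j:Int) + 1 - n < n + 1)), if_neg h3]
        push_cast
        ring
    · have h3 : ¬ (c < (j:Int) + 1 - n) := by omega
      rw [if_neg (by omega : ¬ (c + 1 ≤ (j:Int) + 1 ∧ (j:Int) + 1 < n + 1)), if_neg h2,
          if_neg (by omega : ¬ (c + 1 ≤ (j:Int) + 1 - n ∧ (j:Int) + 1 - n < n + 1)), if_neg h3]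
      push_cast
      ring

lemma main_fold (n : Int) (hn : 1 ≤ n) :
    ∀ (rest pre : List Int), (∀ x ∈ pre, x ≤ n) → (∀ x ∈ rest, 1 - n ≤ x ∧ x ≤ n) →
    List.foldl (astep n) ((PySem.List.pyRange 1 (n+1)).map (bval pre n), PySem.Dict.counter pre) rest
      = ((PySem.List.pyRange 1 (n+1)).map (bval (pre ++ rest) n), PySem.Dict.counter (pre ++ rest)) := by
  intro rest
  induction rest with
  | nil => intro pre hpre _; simp
  | cons c rest ih =>
    intro pre hpre hrest
    obtain ⟨hc1, hcn⟩ := hrest c (by simp)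
    rw [List.foldl_cons, astep_eq pre c n hn hc1 hcn hpre,
        show pre ++ c :: rest = (pre ++ [c]) ++ rest by simp]
    exact ih (pre ++ [c])
      (by intro x hx; rcases List.mem_append.mp hx with h | h
          · exact hpre x h
          · simp at h; subst h; exact hcn)
      (fun x hx => hrest x (by simp [hx]))

-- ---- B-side: the per-item effect and the two pointwise fold lemmas ----
def effp (l : List Int) (n : Int) (ks : List Int) (p : Int × Int) (k : Int) : Int :=
  (if k = p.1 ∨ k - n = p.1 then
      ((PySem.List.slice l none (some p.2)).countP (fun x => p.1 < x) : Int) else 0)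
  - (ks.map (fun b => if p.1 < b ∧ (k = b ∨ k - n = b) then
      ((PySem.List.slice l none (some p.2)).count b : Int) else 0)).sum

lemma b_inner (l : List Int) (n : Int) (hn : 1 ≤ n) (p : Int × Int) :
    ∀ (ks : List Int), (∀ b ∈ ks, 1 - n ≤ b ∧ b ≤ n) → ∀ (g : Int → Int),
    ks.foldl (bstep l p) ((List.range n.toNat).map (fun (j : Nat) => g ((j : Int) + 1)))
    = (List.range n.toNat).map (fun (j : Nat) => g ((j : Int) + 1)
        - (ks.map (fun b => if p.1 < b ∧ ((j : Int) + 1 = b ∨ (j : Int) + 1 - n = b) then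
            ((PySem.List.slice l none (some p.2)).count b : Int) else 0)).sum) := by
  intro ks
  induction ks with
  | nil =>
    intro _ g
    simp
  | cons b ks ih =>
    intro hb g
    obtain ⟨hb1, hbn⟩ := hb b (by simp)
    rw [List.foldl_cons]
    by_cases hab : p.1 < b
    · rw [show bstep l p ((List.range n.toNat).map (fun (j : Nat) => g ((j : Int) + 1))) b
          = PySem.List.pySetD ((List.range n.toNat).map (fun (j : Nat) => g ((j : Int) + 1)))
              (b-1) (PySem.List.pyGetD
                ((List.range n.toNat).map (fun (j : Nat) => g ((j : Int) + 1))) (b-1) 0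
                - ((PySem.List.slice l none (some p.2)).count b : Int))
          from by rw [bstep, if_pos hab]]
      obtain ⟨mb, hmb⟩ : ∃ m : Nat, (m : Int) = if 0 ≤ b - 1 then b - 1 else b - 1 + (n.toNat : Int) :=
        ⟨(if 0 ≤ b - 1 then b - 1 else b - 1 + (n.toNat : Int)).toNat, by split_ifs <;> omega⟩
      have hmb2 : (0 ≤ b - 1 ∧ (mb : Int) = b - 1) ∨ (b - 1 < 0 ∧ (mb : Int) = b - 1 + n) := by
        by_cases h : 0 ≤ b - 1
        · left; rw [if_pos h] at hmb; exact ⟨h, hmb⟩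
        · right; rw [if_neg h] at hmb; exact ⟨by omega, by omega⟩
      rw [getD_W _ _ _ (by omega) (by omega) mb hmb]
      rw [set_W _ _ _ _ (by omega) (by omega) mb hmb]
      have hM : (List.range n.toNat).map (fun (j : Nat) =>
            if j = mb then g ((mb : Int) + 1) - ((PySem.List.slice l none (some p.2)).count b : Int)
            else g ((j : Int) + 1))
          = (List.range n.toNat).map (fun (j : Nat) =>
              (fun k => g k - (if k = b ∨ k - n = b then
                ((PySem.List.slice l none (some p.2)).count b : Int) else 0)) ((j : Int) + 1)) := by
        apply List.map_congr_left
        intro j hj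
        have hjN : j < n.toNat := List.mem_range.mp hj
        dsimp only
        by_cases hjb : j = mb
        · rw [if_pos hjb, if_pos (by omega : (j:Int) + 1 = b ∨ (j:Int) + 1 - n = b)]
          have hfb : (mb : Int) + 1 = (j : Int) + 1 := by omega
          rw [hfb]
        · rw [if_neg hjb, if_neg (by omega : ¬ ((j:Int) + 1 = b ∨ (j:Int) + 1 - n = b))]
          ring
      rw [hM, ih (fun b' hb' => hb b' (by simp [hb']))
            (fun k => g k - (if k = b ∨ k - n = b then
              ((PySem.List.slice l none (some p.2)).count b : Int) else 0))]
      apply List.map_congr_left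
      intro j hj
      dsimp only
      rw [List.map_cons, List.sum_cons]
      by_cases hX : (j : Int) + 1 = b ∨ (j : Int) + 1 - n = b
      · rw [if_pos hX, if_pos ⟨hab, hX⟩]
        ring
      · rw [if_neg hX, if_neg (by tauto)]
        ring
    · rw [show bstep l p ((List.range n.toNat).map (fun (j : Nat) => g ((j : Int) + 1))) b
          = (List.range n.toNat).map (fun (j : Nat) => g ((j : Int) + 1))
          from by rw [bstep, if_neg hab]]
      rw [ih (fun b' hb' => hb b' (by simp [hb'])) g]
      apply List.map_congr_left
      intro j hj
      rw [List.map_cons, List.sum_cons,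
          if_neg (by tauto : ¬ (p.1 < b ∧ ((j:Int) + 1 = b ∨ (j:Int) + 1 - n = b)))]
      ring

lemma b_outer (l : List Int) (n : Int) (hn : 1 ≤ n) (ks : List Int)
    (hks : ∀ b ∈ ks, 1 - n ≤ b ∧ b ≤ n) :
    ∀ (its : List (Int × Int)), (∀ p ∈ its, 1 - n ≤ p.1 ∧ p.1 ≤ n) → ∀ (g : Int → Int),
    its.foldl (bitem l ks) ((List.range n.toNat).map (fun (j : Nat) => g ((j : Int) + 1)))
    = (List.range n.toNat).map (fun (j : Nat) => g ((j : Int) + 1)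
        + (its.map (fun p => effp l n ks p ((j : Int) + 1))).sum) := by
  intro its
  induction its with
  | nil =>
    intro _ g
    simp
  | cons p its ih =>
    intro hp g
    obtain ⟨hp1, hpn⟩ := hp p (by simp)
    rw [List.foldl_cons]
    rw [show bitem l ks ((List.range n.toNat).map (fun (j : Nat) => g ((j : Int) + 1))) p
        = ks.foldl (bstep l p)
            (PySem.List.pySetD ((List.range n.toNat).map (fun (j : Nat) => g ((j : Int) + 1)))
              (p.1-1) (PySem.List.pyGetD
                ((List.range n.toNat).map (fun (j : Nat) => g ((j : Int) + 1))) (p.1-1) 0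
                + ((PySem.List.slice l none (some p.2)).countP (fun x => p.1 < x) : Int)))
        from rfl]
    obtain ⟨mp, hmp⟩ : ∃ m : Nat, (m : Int) = if 0 ≤ p.1 - 1 then p.1 - 1 else p.1 - 1 + (n.toNat : Int) :=
      ⟨(if 0 ≤ p.1 - 1 then p.1 - 1 else p.1 - 1 + (n.toNat : Int)).toNat, by split_ifs <;> omega⟩
    have hmp2 : (0 ≤ p.1 - 1 ∧ (mp : Int) = p.1 - 1) ∨ (p.1 - 1 < 0 ∧ (mp : Int) = p.1 - 1 + n) := by
      by_cases h : 0 ≤ p.1 - 1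
      · left; rw [if_pos h] at hmp; exact ⟨h, hmp⟩
      · right; rw [if_neg h] at hmp; exact ⟨by omega, by omega⟩
    rw [getD_W _ _ _ (by omega) (by omega) mp hmp]
    rw [set_W _ _ _ _ (by omega) (by omega) mp hmp]
    have hM : (List.range n.toNat).map (fun (j : Nat) =>
          if j = mp then g ((mp : Int) + 1)
            + ((PySem.List.slice l none (some p.2)).countP (fun x => p.1 < x) : Int)
          else g ((j : Int) + 1))
        = (List.range n.toNat).map (fun (j : Nat) =>
            (fun k => g k + (if k = p.1 ∨ k - n = p.1 then
              ((PySem.List.slice l none (some p.2)).countP (fun x => p.1 < x) : Int) else 0))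
              ((j : Int) + 1)) := by
      apply List.map_congr_left
      intro j hj
      have hjN : j < n.toNat := List.mem_range.mp hj
      dsimp only
      by_cases hjp : j = mp
      · rw [if_pos hjp, if_pos (by omega : (j:Int) + 1 = p.1 ∨ (j:Int) + 1 - n = p.1)]
        have hf : (mp : Int) + 1 = (j : Int) + 1 := by omega
        rw [hf]
      · rw [if_neg hjp, if_neg (by omega : ¬ ((j:Int) + 1 = p.1 ∨ (j:Int) + 1 - n = p.1))]
        ring
    rw [hM, b_inner l n hn p ks hks
          (fun k => g k + (if k = p.1 ∨ k - n = p.1 then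
            ((PySem.List.slice l none (some p.2)).countP (fun x => p.1 < x) : Int) else 0))]
    rw [ih (fun p' hp' => hp p' (by simp [hp']))
          (fun k => (g k + (if k = p.1 ∨ k - n = p.1 then
            ((PySem.List.slice l none (some p.2)).countP (fun x => p.1 < x) : Int) else 0))
            - (ks.map (fun b => if p.1 < b ∧ (k = b ∨ k - n = b) then
              ((PySem.List.slice l none (some p.2)).count b : Int) else 0)).sum)]
    apply List.map_congr_left
    intro j hj
    dsimp only
    rw [List.map_cons, List.sum_cons]
    simp only [effp]
    ring

-- ---- summing the per-item effects over all items gives bval ----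
lemma sum_map_sub_int {α : Type} (f g : α → Int) (l : List α) :
    (l.map (fun x => f x - g x)).sum = (l.map f).sum - (l.map g).sum := by
  induction l with
  | nil => simp
  | cons x t ih => simp only [List.map_cons, List.sum_cons, ih]; ring

lemma sum_map_ite_mem (f : Int → Int) (t : Int) :
    ∀ (ks : List Int), ks.Nodup →
    (ks.map (fun b => if b = t then f b else 0)).sum = if t ∈ ks then f t else 0 := by
  intro ks
  induction ks with
  | nil => intro _; simp
  | cons b ks ih =>
    intro hnd
    obtain ⟨hb, hnd'⟩ := List.nodup_cons.mp hnd
    rw [List.map_cons, List.sum_cons, ih hnd']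
    by_cases hbt : b = t
    · subst hbt
      rw [if_pos rfl, if_neg hb, if_pos (by simp)]
      ring
    · rw [if_neg hbt]
      by_cases ht : t ∈ ks
      · rw [if_pos ht, if_pos (by simp [ht])]
        ring
      · rw [if_neg ht, if_neg (by simp [ht]; exact fun h => hbt h.symm)]
        ring

lemma foldl_if_add {α : Type} (q : α → Prop) [DecidablePred q] (f : α → Int) :
    ∀ (xs : List α) (s : Int),
    xs.foldl (fun s x => if q x then s + f x else s) s
      = s + (xs.map (fun x => if q x then f x else 0)).sum := by
  intro xs
  induction xs with
  | nil => intro s; simp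
  | cons x t ih =>
    intro s
    rw [List.foldl_cons, List.map_cons, List.sum_cons]
    by_cases hx : q x
    · rw [if_pos hx, if_pos hx, ih]
      ring
    · rw [if_neg hx, if_neg hx, ih]
      ring

lemma cnt_zero (l : List Int) (f v : Int) (h0 : 0 ≤ f) (hv : v ∉ l) :
    ((PySem.List.slice l none (some f)).count v : Int) = 0 := by
  rw [PySem.List.slice_to _ h0]
  rw [List.count_eq_zero.mpr (fun hm => hv (List.mem_of_mem_take hm))]
  rfl

lemma SumA (l : List Int) (v : Int) :
    ((FD l).items.map (fun p => if v = p.1 then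
        ((PySem.List.slice l none (some p.2)).countP (fun x => p.1 < x) : Int) else 0)).sum
      = addv l v := by
  induction l using List.reverseRecOn with
  | nil =>
    rw [show (FD (List.nil (α := Int))).items = [] from rfl, List.map_nil, List.sum_nil,
        addv_nil]
  | append_singleton pre c ih =>
    by_cases hc : c ∈ pre
    · have hco : (FD pre).contains c = true := (FD_contains pre c).mpr hc
      rw [show FD (pre ++ [c]) = FD pre from by rw [FD_append, if_pos hco]]
      rw [List.map_congr_left (fun p hp => by
        obtain ⟨h0, h1⟩ := FD_items_bound pre p hp
        rw [slice_take_stable pre c _ h0 h1] :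
        ∀ p ∈ (FD pre).items, _ = (fun p => if v = p.1 then
          ((PySem.List.slice pre none (some p.2)).countP (fun x => p.1 < x) : Int) else 0) p)]
      rw [ih, addv_seen pre c v hc]
    · have hco : (FD pre).contains c = false := contains_false_of_not_mem pre c hc
      rw [show FD (pre ++ [c]) = (FD pre).insert c (pre.length : Int) from by
            rw [FD_append, if_neg (by simp [hco])],
          PySem.Dict.items_insert_of_not_contains _ _ hco, List.map_append, List.sum_append]
      rw [List.map_congr_left (fun p hp => by
        obtain ⟨h0, h1⟩ := FD_items_bound pre p hp
        rw [slice_take_stable pre c _ h0 h1] :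
        ∀ p ∈ (FD pre).items, _ = (fun p => if v = p.1 then
          ((PySem.List.slice pre none (some p.2)).countP (fun x => p.1 < x) : Int) else 0) p)]
      rw [ih, addv_unseen pre c v hc]
      simp only [List.map_cons, List.map_nil, List.sum_cons, List.sum_nil]
      have h2 : PySem.List.slice (pre ++ [c]) none (some (pre.length : Int)) = pre := by
        rw [PySem.List.slice_to _ (by positivity), Int.toNat_natCast, List.take_left]
      rw [h2]
      split_ifs <;> ring

lemma SumS (l : List Int) (v : Int) :
    ((FD l).items.map (fun p => if p.1 < v then
        ((PySem.List.slice l none (some p.2)).count v : Int) else 0)).sum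
      = subv l v := by
  rw [subv, foldl_if_add (fun (p : Int × Int) => p.1 < v)
        (fun p => ((PySem.List.slice l none (some p.2)).count v : Int)) (FD l).items 0]
  ring

lemma items_sum_eff (l : List Int) (n k : Int) (hn : 1 ≤ n) :
    ((FD l).items.map (fun p => effp l n ((FD l).keys) p k)).sum = bval l n k := by
  have hknn : k ≠ k - n := by omega
  have hnd := FD_keys_nodup l
  have h1 : ((FD l).items.map (fun p => effp l n ((FD l).keys) p k)).sum
      = ((FD l).items.map (fun (p : Int × Int) =>
          ((if k = p.1 then
              ((PySem.List.slice l none (some p.2)).countP (fun x => p.1 < x) : Int) else 0)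
            + (if k - n = p.1 then
              ((PySem.List.slice l none (some p.2)).countP (fun x => p.1 < x) : Int) else 0))
          - ((if p.1 < k then ((PySem.List.slice l none (some p.2)).count k : Int) else 0)
            + (if p.1 < k - n then
              ((PySem.List.slice l none (some p.2)).count (k-n) : Int) else 0)))).sum := by
    refine congrArg List.sum (List.map_congr_left ?_)
    intro p hp
    have hp2 : 0 ≤ p.2 := (FD_items_bound l p hp).1
    rw [effp]
    have e1 : (if k = p.1 ∨ k - n = p.1 then
          ((PySem.List.slice l none (some p.2)).countP (fun x => p.1 < x) : Int) else 0)
        = (if k = p.1 then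
            ((PySem.List.slice l none (some p.2)).countP (fun x => p.1 < x) : Int) else 0)
          + (if k - n = p.1 then
            ((PySem.List.slice l none (some p.2)).countP (fun x => p.1 < x) : Int) else 0) := by
      by_cases hA : k = p.1
      · rw [if_pos (Or.inl hA), if_pos hA, if_neg (show ¬ k - n = p.1 by omega)]
        ring
      · by_cases hB : k - n = p.1
        · rw [if_pos (Or.inr hB), if_neg hA, if_pos hB]
          ring
        · rw [if_neg (by tauto), if_neg hA, if_neg hB]
          ring
    have e21 : ∀ b, (if p.1 < b ∧ (k = b ∨ k - n = b) then
          ((PySem.List.slice l none (some p.2)).count b : Int) else 0)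
        = (if b = k then (if p.1 < k then
            ((PySem.List.slice l none (some p.2)).count k : Int) else 0) else 0)
          + (if b = k - n then (if p.1 < k - n then
            ((PySem.List.slice l none (some p.2)).count (k-n) : Int) else 0) else 0) := by
      intro b
      by_cases hbk : b = k
      · rw [if_pos hbk, if_neg (show ¬ b = k - n by omega)]
        by_cases hpk : p.1 < k
        · rw [if_pos ⟨by omega, Or.inl hbk.symm⟩, if_pos hpk, hbk]
          ring
        · rw [if_neg (show ¬ (p.1 < b ∧ (k = b ∨ k - n = b)) by rintro ⟨h, -⟩; omega),
              if_neg hpk]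
          ring
      · by_cases hbk2 : b = k - n
        · rw [if_neg hbk, if_pos hbk2]
          by_cases hpk : p.1 < k - n
          · rw [if_pos ⟨by omega, Or.inr hbk2.symm⟩, if_pos hpk, hbk2]
            ring
          · rw [if_neg (show ¬ (p.1 < b ∧ (k = b ∨ k - n = b)) by rintro ⟨h, h2 | h2⟩ <;> omega),
                if_neg hpk]
            ring
        · rw [if_neg hbk, if_neg hbk2,
              if_neg (show ¬ (p.1 < b ∧ (k = b ∨ k - n = b)) by rintro ⟨-, h | h⟩ <;> omega)]
          ring
    rw [List.map_congr_left (fun b _ => e21 b), PySem.List.sum_map_add_int,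
        sum_map_ite_mem (fun _ => (if p.1 < k then
          ((PySem.List.slice l none (some p.2)).count k : Int) else 0)) k _ hnd,
        sum_map_ite_mem (fun _ => (if p.1 < k - n then
          ((PySem.List.slice l none (some p.2)).count (k-n) : Int) else 0)) (k-n) _ hnd]
    have hz : ∀ v, v ∉ (FD l).keys →
        (if p.1 < v then ((PySem.List.slice l none (some p.2)).count v : Int) else 0) = 0 := by
      intro v hv
      rw [cnt_zero l p.2 v hp2 (fun hm => hv ((FD_mem_keys l v).mpr hm))]
      split_ifs <;> rfl
    have hX : (if k ∈ (FD l).keys then (if p.1 < k then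
          ((PySem.List.slice l none (some p.2)).count k : Int) else 0) else 0)
        = (if p.1 < k then ((PySem.List.slice l none (some p.2)).count k : Int) else 0) := by
      by_cases hk1 : k ∈ (FD l).keys
      · rw [if_pos hk1]
      · rw [if_neg hk1, hz k hk1]
    have hY : (if k - n ∈ (FD l).keys then (if p.1 < k - n then
          ((PySem.List.slice l none (some p.2)).count (k-n) : Int) else 0) else 0)
        = (if p.1 < k - n then
            ((PySem.List.slice l none (some p.2)).count (k-n) : Int) else 0) := by
      by_cases hk2 : k - n ∈ (FD l).keys
      · rw [if_pos hk2]
      · rw [if_neg hk2, hz (k-n) hk2]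
    rw [e1, hX, hY]
  rw [h1, sum_map_sub_int, PySem.List.sum_map_add_int, PySem.List.sum_map_add_int,
      SumA l k, SumA l (k-n), SumS l k, SumS l (k-n), bval_eq]
  ring

lemma alt_eq_map (sperm : List Int) (n : Int)
    (hmax : PySem.List.max? sperm (fun x => x) = some n) (hn : 1 ≤ n)
    (hb : ∀ x ∈ sperm, 1 - n ≤ x ∧ x ≤ n) :
    get_sperm_point_alt sperm = (PySem.List.pyRange 1 (n+1)).map (bval sperm n) := by
  have hport : get_sperm_point_alt sperm
      = (FD sperm).items.foldl (bitem sperm ((FD sperm).keys)) (List.replicate n.toNat 0) := by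
    simp only [get_sperm_point_alt, hmax]
    rfl
  have hkb : ∀ b ∈ (FD sperm).keys, 1 - n ≤ b ∧ b ≤ n :=
    fun b hbk => hb b ((FD_mem_keys sperm b).mp hbk)
  have hib : ∀ p ∈ (FD sperm).items, 1 - n ≤ p.1 ∧ p.1 ≤ n :=
    fun p hp => hkb p.1 (PySem.Dict.mem_keys_of_mem_items _ hp)
  have hrepl : List.replicate n.toNat (0:Int)
      = (List.range n.toNat).map (fun (j : Nat) => (fun (_ : Int) => (0:Int)) ((j : Int) + 1)) := by
    simp
  rw [hport, hrepl, b_outer sperm n hn ((FD sperm).keys) hkb ((FD sperm).items) hib (fun _ => (0:Int))]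
  rw [pyRange_one_map, List.map_map]
  simp only [Function.comp_def]
  apply List.map_congr_left
  intro j hj
  rw [items_sum_eff sperm n ((j:Int)+1) hn]
  ring

-- ===== VERDICT (by name: the statement is the Claim_ definition above) =====
theorem get_sperm_point_spec : Claim_equal_get_sperm_point := by
  intro sperm _hdom hpre
  obtain ⟨hne, hex, hlow⟩ := hpre
  unfold Spec_get_sperm_point
  cases hmax : PySem.List.max? sperm (fun x => x) with
  | none => exact absurd ((PySem.List.max?_eq_none_iff _ _).mp hmax) hne
  | some n =>
    have hnmem : n ∈ sperm := PySem.List.max?_mem hmax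
    have hmaxle : ∀ x ∈ sperm, x ≤ n := fun x hx => PySem.List.max?_isMax hmax x hx
    have hn : 1 ≤ n := by
      obtain ⟨x, hx, hx1⟩ := hex
      exact le_trans hx1 (hmaxle x hx)
    have hbound : ∀ x ∈ sperm, 1 - n ≤ x ∧ x ≤ n := by
      intro x hx
      refine ⟨?_, hmaxle x hx⟩
      obtain ⟨b, hbmem, hbx⟩ := hlow x hx
      have := hmaxle b hbmem
      omega
    have hA : get_sperm_point sperm
        = (sperm.foldl (astep n) ((PySem.List.pyRange 0 n).map (fun _ => (0 : Int)),
            PySem.Dict.empty)).1 := by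
      simp only [get_sperm_point, hmax]
    have hinit : (PySem.List.pyRange 0 n).map (fun _ => (0 : Int))
        = (PySem.List.pyRange 1 (n+1)).map (bval [] n) := by
      rw [pyRange_zero_map, pyRange_one_map, List.map_map, List.map_map]
      exact List.map_congr_left (fun j _ => by simp [bval_nil])
    have hcnt : (PySem.Dict.empty : PySem.Dict Int Int) = PySem.Dict.counter [] := rfl
    rw [hA, hinit, hcnt, main_fold n hn sperm [] (by simp) hbound,
        alt_eq_map sperm n hmax hn hbound]
    simp
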